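-- pv_equiv track=rewrite | github.com/LukeBomber/AoC_2025 | Aoc2025P/day9/day9.py | part2
-- ===== SOURCE A (Python) =====
-- def part2(input):
--     res = 0
--     for (x1,y1) in input:
--         for (x2,y2) in input:
--             if (x1-x2+1)*(y1-y2+1) > res:
--                 xmax,xmin = (x1,x2) if x1>=x2 else (x2,x1)
--                 ymax,ymin = (y1,y2) if y1>=y2 else (y2,y1)
--                 temp = list(filter(lambda coords: xmin < coords[0] < xmax and ymin < coords[1] < ymax ,input))
--                 if temp == []:
--                     res = (x1-x2+1)*(y1-y2+1)
--     return res
-- ===== SOURCE B (Python) =====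
-- def part2(input):
--     # Sort candidate pairs by area descending, return the first whose open rectangle
--     # contains no point; that is the maximum achievable area.
--     cands = []
--     for (x1, y1) in input:
--         for (x2, y2) in input:
--             area = (x1 - x2 + 1) * (y1 - y2 + 1)
--             if area > 0:
--                 cands.append((area, min(x1, x2), max(x1, x2), min(y1, y2), max(y1, y2)))
--     cands.sort(key=lambda t: t[0], reverse=True)
--     for (area, xlo, xhi, ylo, yhi) in cands:
--         if not any(xlo < x < xhi and ylo < y < yhi for (x, y) in input):
--             return area
--     return 0
-- ===== Notes on version B (the rewrite author's own statement) =====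
-- stated objective: faster
-- what changed: A rescans all points for every new running-max candidate inside the O(n^2) pair loop; B builds the positive-area candidate pairs once, sorts them by area descending, and returns the first whose open rectangle contains no point, so typically only a few emptiness scans run instead of one per improving pair.
import Mathlib
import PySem

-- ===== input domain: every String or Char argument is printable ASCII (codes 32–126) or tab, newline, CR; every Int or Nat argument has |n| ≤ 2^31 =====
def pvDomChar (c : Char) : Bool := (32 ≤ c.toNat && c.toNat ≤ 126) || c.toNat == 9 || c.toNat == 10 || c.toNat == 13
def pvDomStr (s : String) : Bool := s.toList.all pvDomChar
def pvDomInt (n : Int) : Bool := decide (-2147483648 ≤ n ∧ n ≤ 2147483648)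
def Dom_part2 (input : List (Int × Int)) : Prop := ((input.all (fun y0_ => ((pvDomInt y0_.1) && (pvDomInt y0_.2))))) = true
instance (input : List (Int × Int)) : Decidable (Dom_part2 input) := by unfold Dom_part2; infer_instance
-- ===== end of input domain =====

-- B replaces A's accumulate-and-rescan loop by sort-candidates-by-area-descending then
-- return the first pair whose open rectangle is empty (objective: faster in the typical case).

-- ===== PORT A =====
def part2 (input : List (Int × Int)) : Int :=
  input.foldl (fun res p =>
    input.foldl (fun res q =>
      if (p.1 - q.1 + 1) * (p.2 - q.2 + 1) > res then
        let xmax : Int := if p.1 ≥ q.1 then p.1 else q.1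
        let xmin : Int := if p.1 ≥ q.1 then q.1 else p.1
        let ymax : Int := if p.2 ≥ q.2 then p.2 else q.2
        let ymin : Int := if p.2 ≥ q.2 then q.2 else p.2
        let temp := input.filter (fun c => decide (xmin < c.1 ∧ c.1 < xmax ∧ ymin < c.2 ∧ c.2 < ymax))
        if temp = [] then (p.1 - q.1 + 1) * (p.2 - q.2 + 1) else res
      else res) res) 0

-- ===== PORT B =====
-- the scan 'for (area, xlo, xhi, ylo, yhi) in cands: if not any(...): return area / return 0'
def part2AltGo (input : List (Int × Int)) : List (Int × Int × Int × Int × Int) → Int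
  | [] => 0
  | t :: rest =>
      if input.any (fun c => decide (t.2.1 < c.1 ∧ c.1 < t.2.2.1 ∧ t.2.2.2.1 < c.2 ∧ c.2 < t.2.2.2.2)) then
        part2AltGo input rest
      else t.1

def part2_alt (input : List (Int × Int)) : Int :=
  let cands : List (Int × Int × Int × Int × Int) :=
    input.foldl (fun acc p =>
      input.foldl (fun acc q =>
        let area := (p.1 - q.1 + 1) * (p.2 - q.2 + 1)
        if area > 0 then
          acc ++ [(area, min p.1 q.1, max p.1 q.1, min p.2 q.2, max p.2 q.2)]
        else acc) acc) []
  part2AltGo input (PySem.List.sorted cands (fun t => t.1) true)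

-- ===== PRECONDITION & SPEC =====
def Spec_part2 (input : List (Int × Int)) (out : Int) : Prop := out = part2_alt input
instance (input : List (Int × Int)) (out : Int) : Decidable (Spec_part2 input out) := by unfold Spec_part2; infer_instance

-- ===== CLAIM (what is proved, stated in full; the proofs are below) =====
def Claim_equal_part2 : Prop := ∀ (input : List (Int × Int)), Dom_part2 input → Spec_part2 input (part2 input)

-- ===== LEMMAS AND PROOFS =====

-- All ordered pairs of points, in A's (and B's) iteration order.
def pvPairs (input : List (Int × Int)) : List ((Int × Int) × (Int × Int)) :=
  input.flatMap (fun p => input.map (fun q => (p, q)))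

def pvProd (pq : (Int × Int) × (Int × Int)) : Int :=
  (pq.1.1 - pq.2.1 + 1) * (pq.1.2 - pq.2.2 + 1)

def pvTup (pq : (Int × Int) × (Int × Int)) : Int × Int × Int × Int × Int :=
  (pvProd pq, min pq.1.1 pq.2.1, max pq.1.1 pq.2.1, min pq.1.2 pq.2.2, max pq.1.2 pq.2.2)

-- emptiness of the open rectangle of a stored tuple
def pvOk (input : List (Int × Int)) (t : Int × Int × Int × Int × Int) : Bool :=
  !(input.any (fun c => decide (t.2.1 < c.1 ∧ c.1 < t.2.2.1 ∧ t.2.2.2.1 < c.2 ∧ c.2 < t.2.2.2.2)))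

theorem pv_nested_foldl {β : Type} (f : β → (Int × Int) × (Int × Int) → β)
    (l m : List (Int × Int)) (r : β) :
    l.foldl (fun r p => m.foldl (fun r q => f r (p, q)) r) r
      = (l.flatMap (fun p => m.map (fun q => (p, q)))).foldl f r := by
  induction l generalizing r with
  | nil => rfl
  | cons p l ih => simp [List.flatMap_cons, List.foldl_append, List.foldl_map, ih]

theorem pv_if_minmax (a b : Int) : (if a ≥ b then a else b) = max a b ∧ (if a ≥ b then b else a) = min a b := by
  constructor <;> · split <;> omega

-- A's step is "max with the area, when the rectangle is empty"
theorem pv_stepA (input : List (Int × Int)) (r : Int) (pq : (Int × Int) × (Int × Int)) :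
    (if (pq.1.1 - pq.2.1 + 1) * (pq.1.2 - pq.2.2 + 1) > r then
        let xmax : Int := if pq.1.1 ≥ pq.2.1 then pq.1.1 else pq.2.1
        let xmin : Int := if pq.1.1 ≥ pq.2.1 then pq.2.1 else pq.1.1
        let ymax : Int := if pq.1.2 ≥ pq.2.2 then pq.1.2 else pq.2.2
        let ymin : Int := if pq.1.2 ≥ pq.2.2 then pq.2.2 else pq.1.2
        let temp := input.filter (fun c => decide (xmin < c.1 ∧ c.1 < xmax ∧ ymin < c.2 ∧ c.2 < ymax))
        if temp = [] then (pq.1.1 - pq.2.1 + 1) * (pq.1.2 - pq.2.2 + 1) else r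
      else r)
      = (if pvOk input (pvTup pq) then max r (pvProd pq) else r) := by
  obtain ⟨hx1, hx2⟩ := pv_if_minmax pq.1.1 pq.2.1
  obtain ⟨hy1, hy2⟩ := pv_if_minmax pq.1.2 pq.2.2
  simp only [hx1, hx2, hy1, hy2]
  have hok : pvOk input (pvTup pq)
      = !(input.any (fun c => decide (min pq.1.1 pq.2.1 < c.1 ∧ c.1 < max pq.1.1 pq.2.1 ∧
          min pq.1.2 pq.2.2 < c.2 ∧ c.2 < max pq.1.2 pq.2.2))) := rfl
  by_cases hany : input.any (fun c => decide (min pq.1.1 pq.2.1 < c.1 ∧ c.1 < max pq.1.1 pq.2.1 ∧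
      min pq.1.2 pq.2.2 < c.2 ∧ c.2 < max pq.1.2 pq.2.2)) = true
  · have hf : input.filter (fun c => decide (min pq.1.1 pq.2.1 < c.1 ∧ c.1 < max pq.1.1 pq.2.1 ∧
        min pq.1.2 pq.2.2 < c.2 ∧ c.2 < max pq.1.2 pq.2.2)) ≠ [] := by
      obtain ⟨c, hc, hpc⟩ := List.any_eq_true.mp hany
      intro hnil
      exact absurd hpc (by simpa using List.filter_eq_nil_iff.mp hnil c hc)
    rw [hok, hany]
    simp only [Bool.not_true, Bool.false_eq_true, if_false, if_neg hf]
    split <;> rfl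
  · have hany' := eq_false_of_ne_true hany
    have hf : input.filter (fun c => decide (min pq.1.1 pq.2.1 < c.1 ∧ c.1 < max pq.1.1 pq.2.1 ∧
        min pq.1.2 pq.2.2 < c.2 ∧ c.2 < max pq.1.2 pq.2.2)) = [] :=
      List.filter_eq_nil_iff.mpr (List.any_eq_false.mp hany')
    rw [hok, hany']
    simp only [Bool.not_false, if_true, if_pos hf]
    have hp : pvProd pq = (pq.1.1 - pq.2.1 + 1) * (pq.1.2 - pq.2.2 + 1) := rfl
    rw [hp]
    by_cases hgt : (pq.1.1 - pq.2.1 + 1) * (pq.1.2 - pq.2.2 + 1) > r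
    · rw [if_pos hgt]
      exact (max_eq_right (le_of_lt hgt)).symm
    · rw [if_neg hgt]
      exact (max_eq_left (by omega)).symm

theorem pv_foldl_stepA (input : List (Int × Int)) (L : List ((Int × Int) × (Int × Int))) (r : Int) :
    L.foldl (fun r pq => if pvOk input (pvTup pq) then max r (pvProd pq) else r) r
      = ((L.filter (fun pq => pvOk input (pvTup pq))).map pvProd).foldl max r := by
  induction L generalizing r with
  | nil => rfl
  | cons pq L ih =>
      by_cases h : pvOk input (pvTup pq) = true <;>
        simp [h, ih]

-- A computes the maximum area over empty-rectangle pairs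
theorem pv_A_eq (input : List (Int × Int)) :
    part2 input
      = (((pvPairs input).filter (fun pq => pvOk input (pvTup pq))).map pvProd).foldl max 0 := by
  unfold part2
  have h := pv_nested_foldl (fun r pq =>
      if (pq.1.1 - pq.2.1 + 1) * (pq.1.2 - pq.2.2 + 1) > r then
        let xmax : Int := if pq.1.1 ≥ pq.2.1 then pq.1.1 else pq.2.1
        let xmin : Int := if pq.1.1 ≥ pq.2.1 then pq.2.1 else pq.1.1
        let ymax : Int := if pq.1.2 ≥ pq.2.2 then pq.1.2 else pq.2.2
        let ymin : Int := if pq.1.2 ≥ pq.2.2 then pq.2.2 else pq.1.2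
        let temp := input.filter (fun c => decide (xmin < c.1 ∧ c.1 < xmax ∧ ymin < c.2 ∧ c.2 < ymax))
        if temp = [] then (pq.1.1 - pq.2.1 + 1) * (pq.1.2 - pq.2.2 + 1) else r
      else r) input input 0
  rw [h]
  rw [show (pvPairs input) = input.flatMap (fun p => input.map (fun q => (p, q))) from rfl] at *
  rw [← pv_foldl_stepA]
  congr 1
  funext r pq
  exact pv_stepA input r pq

-- B's candidate list
theorem pv_cands_eq (input : List (Int × Int)) :
    input.foldl (fun acc p =>
      input.foldl (fun acc q =>
        let area := (p.1 - q.1 + 1) * (p.2 - q.2 + 1)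
        if area > 0 then
          acc ++ [(area, min p.1 q.1, max p.1 q.1, min p.2 q.2, max p.2 q.2)]
        else acc) acc) ([] : List (Int × Int × Int × Int × Int))
      = ((pvPairs input).filter (fun pq => decide (0 < pvProd pq))).map pvTup := by
  have h2 : input.foldl (fun acc p =>
      input.foldl (fun acc q =>
        let area := (p.1 - q.1 + 1) * (p.2 - q.2 + 1)
        if area > 0 then
          acc ++ [(area, min p.1 q.1, max p.1 q.1, min p.2 q.2, max p.2 q.2)]
        else acc) acc) ([] : List (Int × Int × Int × Int × Int))
      = input.foldl (fun acc p =>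
          input.foldl (fun acc q => if pvProd (p, q) > 0 then acc ++ [pvTup (p, q)] else acc) acc) [] := rfl
  rw [h2, pv_nested_foldl (β := List (Int × Int × Int × Int × Int))
    (fun acc pq => if pvProd pq > 0 then acc ++ [pvTup pq] else acc) input input []]
  have h3 := PySem.List.foldl_append_if (fun pq => decide (0 < pvProd pq)) pvTup
    (input.flatMap (fun p => input.map (fun q => (p, q)))) []
  simpa only [decide_eq_true_eq, List.nil_append, pvPairs] using h3

theorem pv_foldl_max_const (a : Int) (l : List Int) (h : ∀ x ∈ l, x ≤ a) : l.foldl max a = a := by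
  induction l with
  | nil => rfl
  | cons x l ih =>
      simp only [List.foldl_cons]
      rw [max_eq_left (h x (by simp))]
      exact ih (fun y hy => h y (by simp [hy]))

-- the scan over a descending positive list computes the max over the ok elements
theorem pv_go_eq (input : List (Int × Int)) (L : List (Int × Int × Int × Int × Int))
    (hdesc : L.Pairwise (fun a b => b.1 ≤ a.1)) (hpos : ∀ t ∈ L, 0 < t.1) :
    part2AltGo input L = ((L.filter (pvOk input)).map (fun t => t.1)).foldl max 0 := by
  induction L with
  | nil => rfl
  | cons t L ih =>
      rw [List.pairwise_cons] at hdesc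
      by_cases h : pvOk input t = true
      · have hnot : ¬ (input.any (fun c =>
            decide (t.2.1 < c.1 ∧ c.1 < t.2.2.1 ∧ t.2.2.2.1 < c.2 ∧ c.2 < t.2.2.2.2)) = true) := by
          simpa [pvOk] using h
        simp only [part2AltGo, if_neg hnot, List.filter_cons, h, if_pos, List.map_cons,
          List.foldl_cons]
        rw [max_eq_right (le_of_lt (hpos t (by simp)))]
        exact (pv_foldl_max_const t.1 _ (by
          intro x hx
          simp only [List.mem_map, List.mem_filter] at hx
          obtain ⟨u, ⟨hu, _⟩, rfl⟩ := hx
          exact hdesc.1 u hu)).symm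
      · have hany : input.any (fun c =>
            decide (t.2.1 < c.1 ∧ c.1 < t.2.2.1 ∧ t.2.2.2.1 < c.2 ∧ c.2 < t.2.2.2.2)) = true := by
          simpa [pvOk] using h
        simp only [part2AltGo, if_pos hany, List.filter_cons, h]
        exact ih hdesc.2 (fun u hu => hpos u (by simp [hu]))

theorem pv_foldl_max_filter_pos (l : List Int) :
    ((l.filter (fun x => decide (0 < x))).foldl max 0) = l.foldl max 0 := by
  suffices h : ∀ a : Int, 0 ≤ a → (l.filter (fun x => decide (0 < x))).foldl max a = l.foldl max a from
    h 0 le_rfl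
  induction l with
  | nil => intro a _; rfl
  | cons x l ih =>
      intro a ha
      by_cases h : 0 < x
      · simp only [List.filter_cons, decide_eq_true h, if_pos, List.foldl_cons]
        exact ih (max a x) (le_trans ha (le_max_left a x))
      · have : max a x = a := max_eq_left (by omega)
        simp only [List.filter_cons, List.foldl_cons, decide_eq_true_eq, if_neg h, this]
        exact ih a ha

theorem pv_foldl_max_perm {l₁ l₂ : List Int} (h : l₁.Perm l₂) (a : Int) :
    l₁.foldl max a = l₂.foldl max a := by
  induction h generalizing a with
  | nil => rfl
  | cons x _ ih => simp only [List.foldl_cons]; exact ih _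
  | swap x y l => simp only [List.foldl_cons, max_right_comm]
  | trans _ _ ih1 ih2 => exact (ih1 a).trans (ih2 a)

theorem pv_B_map (input : List (Int × Int)) :
    ((((pvPairs input).filter (fun pq => decide (0 < pvProd pq))).map pvTup).filter
        (pvOk input)).map (fun t => t.1)
      = (((pvPairs input).filter (fun pq => pvOk input (pvTup pq))).map pvProd).filter
          (fun x => decide (0 < x)) := by
  rw [List.filter_map, List.map_map, List.filter_filter, List.filter_map, List.filter_filter]
  have hpred : ∀ a, ((pvOk input ∘ pvTup) a && decide (0 < pvProd a))
      = (((fun x => decide (0 < x)) ∘ pvProd) a && (fun pq => pvOk input (pvTup pq)) a) := by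
    intro a
    simp [Function.comp, Bool.and_comm]
  rw [List.filter_congr (fun a _ => hpred a)]
  exact List.map_congr_left (fun a _ => rfl)

-- ===== VERDICT (by name: the statement is the Claim_ definition above) =====
theorem part2_spec : Claim_equal_part2 := by
  intro input _
  show part2 input = part2_alt input
  unfold part2_alt
  rw [pv_cands_eq input]
  set cands := ((pvPairs input).filter (fun pq => decide (0 < pvProd pq))).map pvTup with hc
  have hdesc := PySem.List.sorted_pairwise_rev cands (fun t => t.1)
  have hpos : ∀ t ∈ PySem.List.sorted cands (fun t => t.1) true, 0 < t.1 := by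
    intro t ht
    rw [PySem.List.mem_sorted, hc] at ht
    simp only [List.mem_map, List.mem_filter, decide_eq_true_eq] at ht
    obtain ⟨pq, ⟨_, hpq⟩, rfl⟩ := ht
    exact hpq
  rw [pv_go_eq input _ hdesc hpos]
  have hperm := ((PySem.List.sorted_perm cands (fun t => t.1) true).filter (pvOk input)).map
    (f := fun t => t.1)
  rw [pv_foldl_max_perm hperm 0, hc, pv_B_map input, pv_foldl_max_filter_pos, pv_A_eq input]
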